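-- pv_equiv track=rewrite | github.com/RogerDev/Because | because/causality/calc_indeps.py | getTestItems
-- ===== SOURCE A (Python) =====
-- def getTestItems(targets, testPair=None, minLevel=0, maxLevel=3):
--         assert minLevel <= maxLevel, "calc_indeps.getTestItems: minLevel must be less than or equal to maxLevel (min, max) = " + str(minLevel) + ', ' + str(maxLevel)
--         pairs = []
--         if testPair is None:
--             # We're testing all pairs of variables
--             for i in range(len(targets)):
--                 for j in range(i+1, len(targets)):
--                     pair = (targets[i], targets[j])
--                     pairs.append(pair)
--         else:
--             # Only testing one pair
--             pairs.append(testPair)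
--         # At this point we have all unordered pairs of variables
--         # Now generate first level tests
--         if minLevel == 0:
--             for pair in pairs:
--                 yield (pair[0], pair[1], [])
--         if maxLevel >= 1 and minLevel <= 1:
--             for pair in pairs:
--                 # Generate tests with one conditional
--                 for i in range(len(targets)):
--                     interm = targets[i]
--                     if interm == pair[0] or interm == pair[1]:
--                         continue
--                     yield (pair[0], pair[1], [interm])
--         if maxLevel >= 2 and minLevel <= 2:
--             # And do the same for any double conditionals
--             for pair in pairs:
--                 for i in range(len(targets)):
--                     interm = targets[i]
--                     if interm == pair[0] or interm == pair[1]: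
--                         continue
--                     for j in range(i+1, len(targets)):
--                         interm2 = targets[j]
--                         if interm2 == pair[0] or interm2 == pair[1]:
--                             continue
--                         yield (pair[0], pair[1], [interm, interm2])
--         if maxLevel >= 3 and minLevel <= 3:
--             # Now do 3 level conditionals
--             for pair in pairs:
--                 for i in range(len(targets)):
--                     interm = targets[i]
--                     if interm == pair[0] or interm == pair[1]:
--                         continue
--                     for j in range(i+1, len(targets)):
--                         interm2 = targets[j]
--                         if interm2 == pair[0] or interm2 == pair[1]:
--                             continue
--                         for k in range(j+1, len(targets)):
--                             interm3 = targets[k]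
--                             if interm3 == pair[0] or interm3 == pair[1]:
--                                 continue
--                             yield (pair[0], pair[1], [interm, interm2, interm3])
--
--         if maxLevel >= 4 and minLevel <= 4:
--             # Now do 4 level conditionals
--             for pair in pairs:
--                 for i in range(len(targets)):
--                     interm = targets[i]
--                     if interm == pair[0] or interm == pair[1]:
--                         continue
--                     for j in range(i+1, len(targets)):
--                         interm2 = targets[j]
--                         if interm2 == pair[0] or interm2 == pair[1]:
--                             continue
--                         for k in range(j+1, len(targets)):
--                             interm3 = targets[k]
--                             if interm3 == pair[0] or interm3 == pair[1]:
--                                 continue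
--                             for l in range(k+1, len(targets)):
--                                 interm4 = targets[l]
--                                 if interm4 == pair[0] or interm4 == pair[1]:
--                                     continue
--                                 yield (pair[0], pair[1], [interm, interm2, interm3, interm4])
-- ===== SOURCE B (Python) =====
-- def getTestItems(targets, testPair=None, minLevel=0, maxLevel=3):
--     assert minLevel <= maxLevel, "calc_indeps.getTestItems: minLevel must be less than or equal to maxLevel (min, max) = " + str(minLevel) + ', ' + str(maxLevel)
--     pairs = _pairs(targets) if testPair is None else [testPair]
--     if minLevel == 0:
--         for a, b in pairs:
--             yield (a, b, [])
--     for level in range(1, 5):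
--         if maxLevel >= level and minLevel <= level:
--             for a, b in pairs:
--                 filtered = [t for t in targets if t != a and t != b]
--                 for combo in _combos(filtered, level):
--                     yield (a, b, combo)
--
-- def _pairs(items):
--     if not items:
--         return []
--     head, rest = items[0], items[1:]
--     return [(head, b) for b in rest] + _pairs(rest)
--
-- def _combos(items, k):
--     if k == 0:
--         return [[]]
--     if not items:
--         return []
--     head, rest = items[0], items[1:]
--     return [[head] + c for c in _combos(rest, k - 1)] + _combos(rest, k)
-- ===== Notes on version B (the rewrite author's own statement) =====
-- stated objective: simpler
-- what changed: Replaced A's five bespoke nested-loop blocks (one per conditioning-set size 0..4) with a single generic pass: per pair filter the candidate conditioners once and enumerate k-combinations with a recursive combinations helper, iterating the levels 1..4 under A's exact gating.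
import Mathlib
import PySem

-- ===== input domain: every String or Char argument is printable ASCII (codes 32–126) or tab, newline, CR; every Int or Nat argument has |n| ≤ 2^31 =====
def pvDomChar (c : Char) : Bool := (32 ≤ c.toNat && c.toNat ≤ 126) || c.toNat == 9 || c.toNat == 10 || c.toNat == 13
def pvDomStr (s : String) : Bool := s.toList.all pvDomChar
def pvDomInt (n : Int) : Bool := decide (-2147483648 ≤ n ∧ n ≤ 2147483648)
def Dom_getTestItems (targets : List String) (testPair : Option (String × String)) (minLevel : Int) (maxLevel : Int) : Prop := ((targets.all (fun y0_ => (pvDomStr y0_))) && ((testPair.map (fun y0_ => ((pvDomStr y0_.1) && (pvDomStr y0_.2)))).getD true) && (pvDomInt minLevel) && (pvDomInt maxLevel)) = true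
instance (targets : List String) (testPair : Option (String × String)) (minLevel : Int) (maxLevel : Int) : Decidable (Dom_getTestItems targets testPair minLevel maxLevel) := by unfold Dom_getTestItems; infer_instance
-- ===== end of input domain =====

-- ===== PORT A =====
-- B replaces A's five bespoke nested-loop blocks by one generic pass: filter the
-- conditioning candidates once per pair and enumerate k-combinations (objective: simpler).
-- A's "for i / for j in range(i+1,..)" index loops are transcribed as the obvious suffix
-- recursions over the same elements in the same order.
def pvPairsInnerA (x : String) : List String → List (String × String)
  | [] => []
  | y :: ys => (x, y) :: pvPairsInnerA x ys

def pvPairsA : List String → List (String × String)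
  | [] => []
  | x :: xs => pvPairsInnerA x xs ++ pvPairsA xs

def lvl1A (a b : String) : List String → List (String × String × List String)
  | [] => []
  | x :: xs => (if x = a ∨ x = b then [] else [(a, b, [x])]) ++ lvl1A a b xs

def inner2A (a b x : String) : List String → List (String × String × List String)
  | [] => []
  | y :: ys => (if y = a ∨ y = b then [] else [(a, b, [x, y])]) ++ inner2A a b x ys

def lvl2A (a b : String) : List String → List (String × String × List String)
  | [] => []
  | x :: xs => (if x = a ∨ x = b then [] else inner2A a b x xs) ++ lvl2A a b xs

def inner3bA (a b x y : String) : List String → List (String × String × List String)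
  | [] => []
  | z :: zs => (if z = a ∨ z = b then [] else [(a, b, [x, y, z])]) ++ inner3bA a b x y zs

def inner3aA (a b x : String) : List String → List (String × String × List String)
  | [] => []
  | y :: ys => (if y = a ∨ y = b then [] else inner3bA a b x y ys) ++ inner3aA a b x ys

def lvl3A (a b : String) : List String → List (String × String × List String)
  | [] => []
  | x :: xs => (if x = a ∨ x = b then [] else inner3aA a b x xs) ++ lvl3A a b xs

def inner4cA (a b x y z : String) : List String → List (String × String × List String)
  | [] => []
  | w :: ws => (if w = a ∨ w = b then [] else [(a, b, [x, y, z, w])]) ++ inner4cA a b x y z ws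

def inner4bA (a b x y : String) : List String → List (String × String × List String)
  | [] => []
  | z :: zs => (if z = a ∨ z = b then [] else inner4cA a b x y z zs) ++ inner4bA a b x y zs

def inner4aA (a b x : String) : List String → List (String × String × List String)
  | [] => []
  | y :: ys => (if y = a ∨ y = b then [] else inner4bA a b x y ys) ++ inner4aA a b x ys

def lvl4A (a b : String) : List String → List (String × String × List String)
  | [] => []
  | x :: xs => (if x = a ∨ x = b then [] else inner4aA a b x xs) ++ lvl4A a b xs

def getTestItems (targets : List String) (testPair : Option (String × String)) (minLevel : Int) (maxLevel : Int) : List (String × String × List String) :=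
  let pairs := match testPair with
    | none => pvPairsA targets
    | some p => [p]
  (if minLevel = 0 then pairs.flatMap (fun p => [(p.1, p.2, ([] : List String))]) else []) ++
  (if maxLevel ≥ 1 ∧ minLevel ≤ 1 then pairs.flatMap (fun p => lvl1A p.1 p.2 targets) else []) ++
  (if maxLevel ≥ 2 ∧ minLevel ≤ 2 then pairs.flatMap (fun p => lvl2A p.1 p.2 targets) else []) ++
  (if maxLevel ≥ 3 ∧ minLevel ≤ 3 then pairs.flatMap (fun p => lvl3A p.1 p.2 targets) else []) ++
  (if maxLevel ≥ 4 ∧ minLevel ≤ 4 then pairs.flatMap (fun p => lvl4A p.1 p.2 targets) else [])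

-- ===== PORT B =====
def pvPairsB : List String → List (String × String)
  | [] => []
  | x :: xs => xs.map (fun y => (x, y)) ++ pvPairsB xs

def pvCombos : List String → Nat → List (List String)
  | _, 0 => [[]]
  | [], _ + 1 => []
  | x :: xs, k + 1 => (pvCombos xs k).map (fun c => x :: c) ++ pvCombos xs (k + 1)

def pvFiltB (a b : String) (xs : List String) : List String :=
  xs.filter (fun t => !(t == a) && !(t == b))

def getTestItems_alt (targets : List String) (testPair : Option (String × String)) (minLevel : Int) (maxLevel : Int) : List (String × String × List String) :=
  let pairs := match testPair with
    | none => pvPairsB targets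
    | some p => [p]
  (if minLevel = 0 then pairs.map (fun p => (p.1, p.2, ([] : List String))) else []) ++
  List.flatMap (fun (L : Nat) =>
    if maxLevel ≥ (L : Int) ∧ minLevel ≤ (L : Int) then
      pairs.flatMap (fun p => (pvCombos (pvFiltB p.1 p.2 targets) L).map (fun c => (p.1, p.2, c)))
    else []) [1, 2, 3, 4]

-- ===== PRECONDITION & SPEC =====
-- Pre_ excludes exactly the inputs with minLevel > maxLevel, where A raises AssertionError.
def Pre_getTestItems (targets : List String) (testPair : Option (String × String)) (minLevel : Int) (maxLevel : Int) : Prop := minLevel ≤ maxLevel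
instance (targets : List String) (testPair : Option (String × String)) (minLevel : Int) (maxLevel : Int) : Decidable (Pre_getTestItems targets testPair minLevel maxLevel) := by unfold Pre_getTestItems; infer_instance

def pvWitness_getTestItems : List String × (Option (String × String)) × Int × Int := (["X", "Y", "Z"], none, 0, 3)

def Spec_getTestItems (targets : List String) (testPair : Option (String × String)) (minLevel : Int) (maxLevel : Int) (out : List (String × String × List String)) : Prop := out = getTestItems_alt targets testPair minLevel maxLevel
instance (targets : List String) (testPair : Option (String × String)) (minLevel : Int) (maxLevel : Int) (out : List (String × String × List String)) : Decidable (Spec_getTestItems targets testPair minLevel maxLevel out) := by unfold Spec_getTestItems; infer_instance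

-- ===== CLAIM (what is proved, stated in full; the proofs are below) =====
def Claim_equal_getTestItems : Prop := ∀ (targets : List String) (testPair : Option (String × String)) (minLevel : Int) (maxLevel : Int), Dom_getTestItems targets testPair minLevel maxLevel → Pre_getTestItems targets testPair minLevel maxLevel → Spec_getTestItems targets testPair minLevel maxLevel (getTestItems targets testPair minLevel maxLevel)

-- ===== LEMMAS AND PROOFS =====
theorem pairsInner_eq (x : String) (ys : List String) : pvPairsInnerA x ys = ys.map (fun y => (x, y)) := by
  induction ys with
  | nil => rfl
  | cons y ys ih => simp [pvPairsInnerA, ih]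

theorem pairs_eq (xs : List String) : pvPairsA xs = pvPairsB xs := by
  induction xs with
  | nil => rfl
  | cons x xs ih => simp [pvPairsA, pvPairsB, pairsInner_eq, ih]

theorem filt_cons (a b x : String) (xs : List String) :
    pvFiltB a b (x :: xs) = if x = a ∨ x = b then pvFiltB a b xs else x :: pvFiltB a b xs := by
  by_cases h : x = a ∨ x = b <;> simp [pvFiltB, List.filter_cons, h] <;> tauto

theorem lvl1_eq (a b : String) (xs : List String) :
    lvl1A a b xs = (pvCombos (pvFiltB a b xs) 1).map (fun c => (a, b, c)) := by
  induction xs with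
  | nil => rfl
  | cons x xs ih =>
    by_cases h : x = a ∨ x = b <;> simp [lvl1A, filt_cons, h, pvCombos, ih]

theorem inner2_eq (a b x : String) (ys : List String) :
    inner2A a b x ys = (pvCombos (pvFiltB a b ys) 1).map (fun c => (a, b, x :: c)) := by
  induction ys with
  | nil => rfl
  | cons y ys ih =>
    by_cases h : y = a ∨ y = b <;> simp [inner2A, filt_cons, h, pvCombos, ih]

theorem lvl2_eq (a b : String) (xs : List String) :
    lvl2A a b xs = (pvCombos (pvFiltB a b xs) 2).map (fun c => (a, b, c)) := by
  induction xs with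
  | nil => rfl
  | cons x xs ih =>
    by_cases h : x = a ∨ x = b <;>
      simp [lvl2A, filt_cons, h, pvCombos, ih, inner2_eq, Function.comp]

theorem inner3b_eq (a b x y : String) (zs : List String) :
    inner3bA a b x y zs = (pvCombos (pvFiltB a b zs) 1).map (fun c => (a, b, x :: y :: c)) := by
  induction zs with
  | nil => rfl
  | cons z zs ih =>
    by_cases h : z = a ∨ z = b <;> simp [inner3bA, filt_cons, h, pvCombos, ih]

theorem inner3a_eq (a b x : String) (ys : List String) :
    inner3aA a b x ys = (pvCombos (pvFiltB a b ys) 2).map (fun c => (a, b, x :: c)) := by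
  induction ys with
  | nil => rfl
  | cons y ys ih =>
    by_cases h : y = a ∨ y = b <;>
      simp [inner3aA, filt_cons, h, pvCombos, ih, inner3b_eq, Function.comp]

theorem lvl3_eq (a b : String) (xs : List String) :
    lvl3A a b xs = (pvCombos (pvFiltB a b xs) 3).map (fun c => (a, b, c)) := by
  induction xs with
  | nil => rfl
  | cons x xs ih =>
    by_cases h : x = a ∨ x = b <;>
      simp [lvl3A, filt_cons, h, pvCombos, ih, inner3a_eq, Function.comp]

theorem inner4c_eq (a b x y z : String) (ws : List String) :
    inner4cA a b x y z ws = (pvCombos (pvFiltB a b ws) 1).map (fun c => (a, b, x :: y :: z :: c)) := by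
  induction ws with
  | nil => rfl
  | cons w ws ih =>
    by_cases h : w = a ∨ w = b <;> simp [inner4cA, filt_cons, h, pvCombos, ih]

theorem inner4b_eq (a b x y : String) (zs : List String) :
    inner4bA a b x y zs = (pvCombos (pvFiltB a b zs) 2).map (fun c => (a, b, x :: y :: c)) := by
  induction zs with
  | nil => rfl
  | cons z zs ih =>
    by_cases h : z = a ∨ z = b <;>
      simp [inner4bA, filt_cons, h, pvCombos, ih, inner4c_eq, Function.comp]

theorem inner4a_eq (a b x : String) (ys : List String) :
    inner4aA a b x ys = (pvCombos (pvFiltB a b ys) 3).map (fun c => (a, b, x :: c)) := by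
  induction ys with
  | nil => rfl
  | cons y ys ih =>
    by_cases h : y = a ∨ y = b <;>
      simp [inner4aA, filt_cons, h, pvCombos, ih, inner4b_eq, Function.comp]

theorem lvl4_eq (a b : String) (xs : List String) :
    lvl4A a b xs = (pvCombos (pvFiltB a b xs) 4).map (fun c => (a, b, c)) := by
  induction xs with
  | nil => rfl
  | cons x xs ih =>
    by_cases h : x = a ∨ x = b <;>
      simp [lvl4A, filt_cons, h, pvCombos, ih, inner4a_eq, Function.comp]

theorem flatMap_single {α β : Type} (f : α → β) (l : List α) :
    l.flatMap (fun p => [f p]) = l.map f := by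
  induction l <;> simp_all

-- ===== VERDICT (by name: the statement is the Claim_ definition above) =====
theorem getTestItems_spec : Claim_equal_getTestItems := by
  intro targets testPair minLevel maxLevel _ _
  unfold Spec_getTestItems getTestItems getTestItems_alt
  simp only [pairs_eq, flatMap_single, List.flatMap_cons, List.flatMap_nil, List.append_nil,
    List.append_assoc, Nat.cast_ofNat, Nat.cast_one, lvl1_eq, lvl2_eq, lvl3_eq, lvl4_eq]
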